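-- pv_equiv track=rewrite | github.com/Shreya-P-Pasalkar/Python_Programming | Logic_Building/program39.py | CountNonFactors
-- ===== SOURCE A (Python) =====
-- def CountNonFactors(No) :
--     iSum = 0
--
--     # Handling negative Value
--     if(No < 0) :
--         No = -No
--
--     # Iteration using for loop
--     for i in range(1,(No + 1)) :
--         if((No % i) != 0) :
--             iSum += 1
--
--     return iSum
-- ===== SOURCE B (Python) =====
-- def CountNonFactors(No):
--     n = -No if No < 0 else No
--     divisors = 0
--     i = 1
--     while i * i <= n:
--         if n % i == 0:
--             divisors += 1 if i * i == n else 2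
--         i += 1
--     return n - divisors
-- ===== Notes on version B (the rewrite author's own statement) =====
-- stated objective: faster
-- what changed: Instead of scanning all i in 1..|No| and counting non-divisors, B counts divisors in O(sqrt(No)) by pairing each small divisor i with No//i and returns |No| minus that count.
import Mathlib
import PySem

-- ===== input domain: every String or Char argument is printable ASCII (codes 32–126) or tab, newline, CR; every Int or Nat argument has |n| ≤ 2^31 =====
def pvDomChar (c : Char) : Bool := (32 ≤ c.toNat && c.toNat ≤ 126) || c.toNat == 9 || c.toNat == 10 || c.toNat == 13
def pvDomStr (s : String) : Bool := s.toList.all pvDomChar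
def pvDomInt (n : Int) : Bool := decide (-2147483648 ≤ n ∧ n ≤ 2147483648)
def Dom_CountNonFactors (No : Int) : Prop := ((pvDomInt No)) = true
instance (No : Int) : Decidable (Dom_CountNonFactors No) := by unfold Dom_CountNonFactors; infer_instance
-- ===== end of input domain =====

-- B replaces A's linear scan of 1..|No| by an O(√|No|) divisor-pairing count, returning |No| minus the divisor count.

-- ===== PORT A =====
def CountNonFactors (No : Int) : Int :=
  let No1 := if No < 0 then -No else No
  (PySem.List.pyRange 1 (No1 + 1) 1).foldl
    (fun iSum i => if PySem.Int.mod No1 i ≠ 0 then iSum + 1 else iSum) 0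

-- ===== PORT B =====
-- while i*i <= n: if n % i == 0: divisors += 1 if i*i == n else 2; i += 1
def pvDivLoop (n i divisors : Int) : Int :=
  if i * i ≤ n then
    pvDivLoop n (i + 1)
      (divisors + (if PySem.Int.mod n i = 0 then (if i * i = n then 1 else 2) else 0))
  else divisors
termination_by (n + 1 - i).toNat
decreasing_by
  have h1 : i ≤ i * i := by nlinarith [mul_self_nonneg (i - 1)]
  have h2 : i ≤ n := by omega
  omega

def CountNonFactors_alt (No : Int) : Int :=
  let n := if No < 0 then -No else No
  n - pvDivLoop n 1 0

-- ===== PRECONDITION & SPEC =====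
def Spec_CountNonFactors (No : Int) (out : Int) : Prop := out = CountNonFactors_alt No
instance (No : Int) (out : Int) : Decidable (Spec_CountNonFactors No out) := by unfold Spec_CountNonFactors; infer_instance

-- ===== CLAIM (what is proved, stated in full; the proofs are below) =====
def Claim_equal_CountNonFactors : Prop := ∀ (No : Int), Dom_CountNonFactors No → Spec_CountNonFactors No (CountNonFactors No)

-- ===== LEMMAS AND PROOFS =====

-- Nat shadow of B's loop body weight and loop
def pvW (m j : Nat) : Nat := if j ∣ m then (if j * j = m then 1 else 2) else 0

def pvLoopNat (m i : Nat) : Nat :=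
  if i * i ≤ m then pvW m i + pvLoopNat m (i + 1) else 0
termination_by m + 1 - i
decreasing_by
  have h1 : i ≤ i * i := by
    rcases Nat.eq_zero_or_pos i with h | h
    · simp [h]
    · exact Nat.le_mul_of_pos_left i h
  omega

-- the set of divisors of m in 1..m
def pvD (m : Nat) : Finset Nat := (Finset.Icc 1 m).filter (fun d => d ∣ m)

-- bridge: B's Int loop computes the Nat shadow
theorem pvDivLoop_natCast (m : Nat) : ∀ k i, 1 ≤ i → m + 1 - i ≤ k →
    ∀ acc : Int, pvDivLoop (m : Int) (i : Int) acc = acc + (pvLoopNat m i : Int) := by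
  intro k
  induction k with
  | zero =>
    intro i hi hk acc
    have hii : i ≤ i * i := Nat.le_mul_of_pos_left i (by omega)
    have hgt : ¬ (i * i ≤ m) := by omega
    rw [pvDivLoop, pvLoopNat]
    have hgt' : ¬ ((i : Int) * i ≤ (m : Int)) := by exact_mod_cast hgt
    simp [hgt, hgt']
  | succ k ih =>
    intro i hi hk acc
    rw [pvDivLoop, pvLoopNat]
    by_cases h : i * i ≤ m
    · have h' : ((i : Int) * i ≤ (m : Int)) := by exact_mod_cast h
      have hmod : PySem.Int.mod (m : Int) (i : Int) = ((m % i : Nat) : Int) :=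
        PySem.Int.mod_natCast m i
      have hdvd : (PySem.Int.mod (m : Int) (i : Int) = 0) ↔ i ∣ m := by
        rw [hmod]; exact_mod_cast (Nat.dvd_iff_mod_eq_zero).symm
      have heqsq : ((i : Int) * i = (m : Int)) ↔ i * i = m := by exact_mod_cast Iff.rfl
      have hii : i ≤ i * i := Nat.le_mul_of_pos_left i (by omega)
      have hrec := ih (i + 1) (by omega) (by omega)
        (acc + (if PySem.Int.mod (m : Int) (i : Int) = 0 then (if (i : Int) * i = (m : Int) then 1 else 2) else 0))
      rw [if_pos h', if_pos h]
      push_cast at hrec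
      rw [hrec]
      unfold pvW
      by_cases hd : i ∣ m
      · rw [if_pos (hdvd.mpr hd), if_pos hd]
        by_cases hs : i * i = m
        · rw [if_pos (heqsq.mpr hs), if_pos hs]; push_cast; ring
        · rw [if_neg (fun hc => hs (heqsq.mp hc)), if_neg hs]; push_cast; ring
      · rw [if_neg (fun hc => hd (hdvd.mp hc)), if_neg hd]; push_cast; ring
    · have h' : ¬ ((i : Int) * i ≤ (m : Int)) := by exact_mod_cast h
      rw [if_neg h', if_neg h]
      simp

-- the Nat loop sums the weights over Icc i (sqrt m)
theorem pvLoopNat_eq_sum (m : Nat) : ∀ k i, 1 ≤ i → m + 1 - i ≤ k →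
    pvLoopNat m i = ∑ j ∈ Finset.Icc i (Nat.sqrt m), pvW m j := by
  intro k
  induction k with
  | zero =>
    intro i hi hk
    have hii : i ≤ i * i := Nat.le_mul_of_pos_left i (by omega)
    have hgt : ¬ (i * i ≤ m) := by omega
    have hs : Nat.sqrt m < i := by
      by_contra hc
      exact hgt (Nat.le_sqrt.mp (by omega))
    rw [pvLoopNat]
    simp [hgt, Finset.Icc_eq_empty_of_lt hs]
  | succ k ih =>
    intro i hi hk
    rw [pvLoopNat]
    by_cases h : i * i ≤ m
    · have hii : i ≤ i * i := Nat.le_mul_of_pos_left i (by omega)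
      have hsle : i ≤ Nat.sqrt m := Nat.le_sqrt.mpr h
      rw [ih (i + 1) (by omega) (by omega), if_pos h]
      rw [show Finset.Icc i (Nat.sqrt m) = insert i (Finset.Icc (i + 1) (Nat.sqrt m)) by
        ext x; simp [Finset.mem_Icc, Finset.mem_insert]; omega]
      rw [Finset.sum_insert (by simp [Finset.mem_Icc])]
    · have hs : Nat.sqrt m < i := by
        by_contra hc
        exact h (Nat.le_sqrt.mp (by omega))
      simp [h, Finset.Icc_eq_empty_of_lt hs]

-- the weight sum over 1..sqrt m counts all divisors, by pairing d with m / d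
theorem pvSum_eq_card (m : Nat) (hm : 1 ≤ m) :
    ∑ j ∈ Finset.Icc 1 (Nat.sqrt m), pvW m j = (pvD m).card := by
  classical
  set D := pvD m with hD
  set S := D.filter (fun d => d * d < m) with hS
  set E := D.filter (fun d => d * d = m) with hE
  set L := D.filter (fun d => m < d * d) with hL
  set T := D.filter (fun d => d * d ≤ m) with hT
  -- membership facts
  have hmemD : ∀ d, d ∈ D ↔ (1 ≤ d ∧ d ∣ m) := by
    intro d
    simp only [hD, pvD, Finset.mem_filter, Finset.mem_Icc]
    constructor
    · rintro ⟨⟨h1, _⟩, h2⟩; exact ⟨h1, h2⟩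
    · rintro ⟨h1, h2⟩; exact ⟨⟨h1, Nat.le_of_dvd hm h2⟩, h2⟩
  -- step a+b: the weight sum is a sum over T
  have ha : ∑ j ∈ Finset.Icc 1 (Nat.sqrt m), pvW m j
      = ∑ j ∈ T, (if j * j = m then 1 else 2) := by
    unfold pvW
    rw [← Finset.sum_filter]
    apply Finset.sum_congr _ (fun _ _ => rfl)
    ext j
    simp only [Finset.mem_filter, Finset.mem_Icc, hT, hmemD j]
    constructor
    · rintro ⟨⟨h1, h2⟩, h3⟩
      exact ⟨⟨h1, h3⟩, Nat.le_sqrt.mp h2⟩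
    · rintro ⟨⟨h1, h3⟩, h2⟩
      exact ⟨⟨h1, Nat.le_sqrt.mpr h2⟩, h3⟩
  -- step c: split T into E and S
  have hTE : T.filter (fun d => d * d = m) = E := by
    simp only [hT, hE, Finset.filter_filter]
    apply Finset.filter_congr; intro d _; omega
  have hTS : T.filter (fun d => ¬ (d * d = m)) = S := by
    simp only [hT, hS, Finset.filter_filter]
    apply Finset.filter_congr; intro d _; omega
  have hc : ∑ j ∈ T, (if j * j = m then 1 else 2) = E.card + 2 * S.card := by
    rw [← Finset.sum_filter_add_sum_filter_not T (fun d => d * d = m)]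
    rw [Finset.sum_ite_of_true (by intro d hd; exact (Finset.mem_filter.mp hd).2),
        Finset.sum_ite_of_false (by intro d hd; exact (Finset.mem_filter.mp hd).2)]
    rw [hTE, hTS]
    simp [Finset.sum_const, Nat.mul_comm]
  -- step d: D partitions into S, E, L
  have hd : D.card = S.card + E.card + L.card := by
    have h1 : T.card + L.card = D.card := by
      have := Finset.filter_card_add_filter_neg_card_eq_card
        (s := D) (p := fun d => d * d ≤ m)
      rw [hT, hL]
      rw [show D.filter (fun d => m < d * d) = D.filter (fun d => ¬ (d * d ≤ m)) by
        apply Finset.filter_congr; intro d _; simp]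
      exact this
    have h2 : E.card + S.card = T.card := by
      have := Finset.filter_card_add_filter_neg_card_eq_card
        (s := T) (p := fun d => d * d = m)
      rw [hTE, hTS] at this
      exact this
    omega
  -- step e: S and L have the same cardinality via d ↦ m / d
  have he : S.card = L.card := by
    apply Finset.card_bij' (fun d _ => m / d) (fun d _ => m / d)
    · intro d hd
      rw [hS, Finset.mem_filter, hmemD d] at hd
      obtain ⟨⟨hd1, hdvd⟩, hlt⟩ := hd
      obtain ⟨c, hc'⟩ := hdvd
      have hdpos : 0 < d := hd1
      have hcv : m / d = c := by rw [hc', Nat.mul_div_cancel_left c hdpos]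
      have hcpos : 0 < c := Nat.pos_of_ne_zero (fun h0 => by subst h0; simp at hc'; omega)
      have hdc : d < c := by
        by_contra hcd
        push_neg at hcd
        have : d * c ≤ d * d := Nat.mul_le_mul_left d hcd
        omega
      rw [hL, Finset.mem_filter, hmemD, hcv]
      refine ⟨⟨hcpos, ⟨d, by rw [hc']; ring⟩⟩, ?_⟩
      calc m = d * c := hc'
        _ < c * c := by
          apply Nat.mul_lt_mul_of_lt_of_le hdc (le_refl c)
          omega
    · intro l hl
      rw [hL, Finset.mem_filter, hmemD l] at hl
      obtain ⟨⟨hl1, hdvd⟩, hgt⟩ := hl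
      obtain ⟨c, hc'⟩ := hdvd
      have hlpos : 0 < l := hl1
      have hcv : m / l = c := by rw [hc', Nat.mul_div_cancel_left c hlpos]
      have hcpos : 0 < c := Nat.pos_of_ne_zero (fun h0 => by subst h0; simp at hc'; omega)
      have hcl : c < l := by
        by_contra hcd
        push_neg at hcd
        have : l * l ≤ l * c := Nat.mul_le_mul_left l hcd
        omega
      rw [hS, Finset.mem_filter, hmemD, hcv]
      refine ⟨⟨hcpos, ⟨l, by rw [hc']; ring⟩⟩, ?_⟩
      calc c * c < c * l := by
            apply Nat.mul_lt_mul_of_le_of_lt (le_refl c) hcl hcpos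
        _ = m := by rw [hc']; ring
    · intro d hd
      rw [hS, Finset.mem_filter, hmemD d] at hd
      exact Nat.div_div_self hd.1.2 (by omega)
    · intro l hl
      rw [hL, Finset.mem_filter, hmemD l] at hl
      exact Nat.div_div_self hl.1.2 (by omega)
  rw [ha, hc, hd, he]
  omega

-- A's fold over range(1, k+1) counts non-divisors of m among 1..k
theorem pvFoldA (m : Nat) : ∀ k : Nat,
    (PySem.List.pyRange 1 ((k : Int) + 1) 1).foldl
      (fun iSum i => if PySem.Int.mod (m : Int) i ≠ 0 then iSum + 1 else iSum) 0
    = (k : Int) - (((Finset.Icc 1 k).filter (fun d => d ∣ m)).card : Int) := by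
  intro k
  induction k with
  | zero =>
    rw [PySem.List.pyRange_one_eq_nil (by omega)]
    simp
  | succ k ih =>
    have hsplit : PySem.List.pyRange 1 ((k : Int) + 1 + 1) 1
        = PySem.List.pyRange 1 ((k : Int) + 1) 1 ++ [(k : Int) + 1] :=
      PySem.List.pyRange_one_succ_right (by omega)
    push_cast
    rw [hsplit, List.foldl_append, ih]
    simp only [List.foldl_cons, List.foldl_nil]
    have hicc : Finset.Icc 1 (k + 1) = insert (k + 1) (Finset.Icc 1 k) := by
      ext x; simp only [Finset.mem_Icc, Finset.mem_insert]; omega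
    have hmod : PySem.Int.mod (m : Int) ((k : Int) + 1) = ((m % (k + 1) : Nat) : Int) := by
      exact_mod_cast PySem.Int.mod_natCast m (k + 1)
    have hnotmem : (k + 1) ∉ Finset.Icc 1 k := by simp
    rw [hicc, Finset.filter_insert]
    by_cases hdvd : (k + 1) ∣ m
    · have hz : m % (k + 1) = 0 := (Nat.dvd_iff_mod_eq_zero).mp hdvd
      have hz' : PySem.Int.mod (m : Int) ((k : Int) + 1) = 0 := by
        rw [hmod, hz]; norm_num
      rw [if_neg (not_not_intro hz'), if_pos hdvd,
        Finset.card_insert_of_notMem (by simp [Finset.mem_filter, hnotmem])]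
      push_cast
      ring
    · have hz : m % (k + 1) ≠ 0 := fun h => hdvd ((Nat.dvd_iff_mod_eq_zero).mpr h)
      have hz' : PySem.Int.mod (m : Int) ((k : Int) + 1) ≠ 0 := by
        rw [hmod]; exact_mod_cast hz
      rw [if_pos hz', if_neg hdvd]
      ring

-- B's whole loop counts the divisors
theorem pvLoop_card (m : Nat) :
    pvDivLoop (m : Int) 1 0 = (((Finset.Icc 1 m).filter (fun d => d ∣ m)).card : Int) := by
  rcases Nat.eq_zero_or_pos m with hm | hm
  · subst hm
    rw [pvDivLoop]
    norm_num
  · have h1 := pvDivLoop_natCast m (m + 1) 1 (by omega) (by omega) 0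
    have h2 := pvLoopNat_eq_sum m (m + 1) 1 (by omega) (by omega)
    have h3 := pvSum_eq_card m hm
    rw [show ((1 : Nat) : Int) = 1 by norm_num] at h1
    rw [h1, h2, h3]
    simp [pvD]

-- ===== VERDICT (by name: the statement is the Claim_ definition above) =====
theorem CountNonFactors_spec : Claim_equal_CountNonFactors := by
  intro No _
  unfold Spec_CountNonFactors CountNonFactors CountNonFactors_alt
  dsimp only
  obtain ⟨m, hm⟩ : ∃ m : Nat, (if No < 0 then -No else No) = (m : Int) :=
    ⟨(if No < 0 then -No else No).toNat, by split <;> omega⟩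
  rw [hm, pvFoldA m m, pvLoop_card m]
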